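-- pv_equiv track=rewrite | github.com/AsokTamang/Leetcode-DSA | basics/advancedrecursion.py | combinationIII
-- ===== SOURCE A (Python) =====
-- def combinationIII(k, target):
--     ans = []
--     nums = []
--
--     def solvethirdcombination(index, presum):
--         if len(nums) == k:  # the question is asking us to determine the set of length k
--             if (
--                 presum == target
--             ):  # only if the sum of the formed array is equal to the target number, then we append the copy of nums in our ans variable
--                 ans.append(nums.copy())
--             return
--         for i in range(index, 10):
--
--             nums.append(i)
--             solvethirdcombination(i + 1, presum + i)
--             nums.pop()  # backtracking
--
--     solvethirdcombination(
--         1, 0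
--     )  # as the question is asking us to use the numerals 1 through 9, and no duplicate numbers or values are allowed while making the subset
--     return ans
-- ===== SOURCE B (Python) =====
-- def combinationIII(k, target):
--     # at most 9 distinct digits 1-9 exist, so outside 0..9 no subset of length k exists
--     if k < 0 or k > 9:
--         return []
--     levels = [([], 1, 0)]  # (combo, next candidate digit, sum so far)
--     for _ in range(k):
--         levels = [(c + [d], d + 1, s + d)
--                   for (c, start, s) in levels
--                   for d in range(start, 10)]
--     return [c for (c, _, s) in levels if s == target]
-- ===== Notes on version B (the rewrite author's own statement) =====
-- stated objective: alternative
-- what changed: Replaces A's recursive backtracking with a shared mutable accumulator by an iterative level-by-level (BFS) construction of all k-combinations of 1..9 carrying (combo, next digit, running sum), followed by a sum filter; lexicographic order is preserved.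
import Mathlib
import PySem

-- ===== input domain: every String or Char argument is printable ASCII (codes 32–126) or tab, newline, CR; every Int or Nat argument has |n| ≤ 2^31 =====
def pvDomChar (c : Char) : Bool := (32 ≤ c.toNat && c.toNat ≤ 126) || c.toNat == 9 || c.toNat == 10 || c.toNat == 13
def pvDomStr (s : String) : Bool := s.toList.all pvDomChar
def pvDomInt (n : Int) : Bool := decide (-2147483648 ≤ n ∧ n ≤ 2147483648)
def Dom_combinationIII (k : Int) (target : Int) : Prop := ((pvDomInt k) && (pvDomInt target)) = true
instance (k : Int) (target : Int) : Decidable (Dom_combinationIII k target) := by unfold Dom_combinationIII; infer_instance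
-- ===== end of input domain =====

-- B replaces A's recursive backtracking (shared nums accumulator, pop) by an iterative
-- level-by-level construction of all k-combinations followed by a sum filter (alternative, not faster).

-- ===== PORT A =====
-- A's inner function: the `if len(nums)==k` head (solveA) and the `for i in range(index,10)`
-- loop (loopA); the range suffix [index..9] is carried as the list `digits`, so the recursive
-- call's range(i+1,10) is the tail after i.
mutual
def solveA (k target : Int) (digits : List Int) (nums : List Int) (presum : Int)
    (acc : List (List Int)) : List (List Int) :=
  if (nums.length : Int) = k then
    if presum = target then acc ++ [nums] else acc
  else loopA k target digits nums presum acc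
termination_by (digits.length, 1)

def loopA (k target : Int) (digits : List Int) (nums : List Int) (presum : Int)
    (acc : List (List Int)) : List (List Int) :=
  match digits with
  | [] => acc
  | i :: rest => loopA k target rest nums presum (solveA k target rest (nums ++ [i]) (presum + i) acc)
termination_by (digits.length, 0)
end

def combinationIII (k : Int) (target : Int) : List (List Int) :=
  solveA k target (PySem.List.pyRange 1 10 1) [] 0 []

-- ===== PORT B =====
def stepB (levels : List (List Int × Int × Int)) : List (List Int × Int × Int) :=
  levels.flatMap (fun t => (PySem.List.pyRange t.2.1 10 1).map (fun d => (t.1 ++ [d], d + 1, t.2.2 + d)))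

def combinationIII_alt (k : Int) (target : Int) : List (List Int) :=
  if k < 0 ∨ 9 < k then []
  else
    let levels := (List.range k.toNat).foldl (fun levels _ => stepB levels)
      [(([] : List Int), (1 : Int), (0 : Int))]
    levels.filterMap (fun t => if t.2.2 = target then some t.1 else none)

-- ===== PRECONDITION & SPEC =====
def Spec_combinationIII (k : Int) (target : Int) (out : List (List Int)) : Prop := out = combinationIII_alt k target
instance (k : Int) (target : Int) (out : List (List Int)) : Decidable (Spec_combinationIII k target out) := by unfold Spec_combinationIII; infer_instance

-- ===== CLAIM (what is proved, stated in full; the proofs are below) =====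
def Claim_equal_combinationIII : Prop := ∀ (k : Int) (target : Int), Dom_combinationIII k target → Spec_combinationIII k target (combinationIII k target)

-- ===== LEMMAS AND PROOFS =====

-- target-free enumeration of the k-subsets A's recursion visits, in A's (lexicographic) order
def enumA (k : Int) (digits : List Int) (nums : List Int) : List (List Int) :=
  if (nums.length : Int) = k then [nums]
  else match digits with
    | [] => []
    | i :: rest => enumA k rest (nums ++ [i]) ++ enumA k rest nums

lemma solveA_eq (k target : Int) (digits : List Int) :
    ∀ nums presum acc, presum = nums.sum →
      solveA k target digits nums presum acc
        = acc ++ (enumA k digits nums).filter (fun c => c.sum == target) := by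
  induction digits with
  | nil =>
    intro nums presum acc h
    rw [solveA, enumA]
    by_cases hk : (nums.length : Int) = k
    · subst h
      by_cases ht : nums.sum = target <;>
        simp [hk, ht, List.filter]
    · simp [hk, loopA]
  | cons i rest ih =>
    intro nums presum acc h
    rw [solveA, enumA]
    by_cases hk : (nums.length : Int) = k
    · subst h
      by_cases ht : nums.sum = target <;>
        simp [hk, ht, List.filter]
    · simp only [hk, if_false, loopA]
      rw [ih (nums ++ [i]) (presum + i) acc (by simp [h])]
      have hrest : loopA k target rest nums presum
            (acc ++ (enumA k rest (nums ++ [i])).filter (fun c => c.sum == target))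
          = solveA k target rest nums presum
            (acc ++ (enumA k rest (nums ++ [i])).filter (fun c => c.sum == target)) := by
        rw [solveA, if_neg hk]
      rw [hrest, ih nums presum _ h, List.filter_append, List.append_assoc]

lemma enumA_neg (k : Int) (hk : k < 0) :
    ∀ digits nums, enumA k digits nums = [] := by
  intro digits
  induction digits with
  | nil => intro nums; rw [enumA]; simp; omega
  | cons i rest ih =>
    intro nums
    rw [enumA]
    have : (nums.length : Int) ≠ k := by omega
    simp [this, ih]

lemma enumA_big (k : Int) :
    ∀ digits nums, (nums.length : Int) + digits.length < k → enumA k digits nums = [] := by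
  intro digits
  induction digits with
  | nil => intro nums h; rw [enumA]; simp at h ⊢; omega
  | cons i rest ih =>
    intro nums h
    rw [enumA]
    simp only [List.length_cons] at h
    have hne : (nums.length : Int) ≠ k := by push_cast at h ⊢; omega
    rw [if_neg hne, ih (nums ++ [i]) (by simp; push_cast at h ⊢; omega),
      ih nums (by push_cast at h ⊢; omega)]
    rfl

-- the running sum stored in each level triple is the sum of its combo
lemma stepB_inv (L : List (List Int × Int × Int))
    (h : ∀ t ∈ L, t.2.2 = t.1.sum) : ∀ t ∈ stepB L, t.2.2 = t.1.sum := by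
  intro t ht
  simp only [stepB, List.mem_flatMap, List.mem_map] at ht
  obtain ⟨u, hu, d, _, rfl⟩ := ht
  simp [h u hu]

lemma levels_inv (k : Nat) :
    ∀ t ∈ (List.range k).foldl (fun levels _ => stepB levels)
        [(([] : List Int), (1 : Int), (0 : Int))], t.2.2 = t.1.sum := by
  induction k with
  | zero => simp
  | succ n ih =>
    rw [List.range_succ, List.foldl_append]
    exact stepB_inv _ ih

lemma filterMap_eq_filter (target : Int) :
    ∀ L : List (List Int × Int × Int), (∀ t ∈ L, t.2.2 = t.1.sum) →
      L.filterMap (fun t => if t.2.2 = target then some t.1 else none)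
        = (L.map (·.1)).filter (fun c => c.sum == target) := by
  intro L
  induction L with
  | nil => intro _; rfl
  | cons t rest ih =>
    intro h
    have ht := h t (List.mem_cons_self)
    simp only [List.filterMap_cons, List.map_cons, List.filter_cons]
    rw [ih (fun u hu => h u (List.mem_cons_of_mem _ hu))]
    by_cases hc : t.2.2 = target <;> simp [hc, ht] at * <;> simp [hc, ht]

-- for each feasible k the two target-free enumerations coincide (checked by computation)
lemma enum_eq_levels (k : Int) (h0 : 0 ≤ k) (h9 : k ≤ 9) :
    enumA k (PySem.List.pyRange 1 10 1) []
      = ((List.range k.toNat).foldl (fun levels _ => stepB levels)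
          [(([] : List Int), (1 : Int), (0 : Int))]).map (·.1) := by
  interval_cases k <;> decide

-- ===== VERDICT (by name: the statement is the Claim_ definition above) =====
theorem combinationIII_spec : Claim_equal_combinationIII := by
  intro k target _
  unfold Spec_combinationIII combinationIII combinationIII_alt
  rw [solveA_eq k target _ [] 0 [] rfl, List.nil_append]
  by_cases hk : k < 0 ∨ 9 < k
  · rw [if_pos hk]
    rcases hk with hk | hk
    · rw [enumA_neg k hk]; rfl
    · rw [enumA_big k _ _ (by simp [PySem.List.pyRange]; omega)]
      rfl
  · push Not at hk
    rw [if_neg (by omega)]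
    rw [filterMap_eq_filter target _ (levels_inv k.toNat), enum_eq_levels k hk.1 hk.2]
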